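-- pv_equiv track=rewrite | github.com/apsommer/algorithms | problem_3.py | move_pivot
-- ===== SOURCE A (Python) =====
-- def move_pivot(input, s, p):
--
--     # either the pivot index p, or the start index s, move on each iteration
--
--     # base case: the indexes are pointing to the same element
--     if p == s:
--         return p
--
--     # get the element values at these indexes
--     start = input[s]
--     pivot = input[p]
--
--     # if the pivot value is less than the start value, rotate three elements
--     # resulting in the pivot moving back one index
--     if pivot < start:
--
--         # one less than pivot to start, pivot back one, start to pivot
--         input[s] = input[p - 1]
--         input[p - 1] = pivot
--         input[p] = start
--
--         # move the pivot index back one to reflect the change and prepare for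
--         # next level of recursion
--         p -= 1
--
--     # else don't move any elements, but consider one element to the right of
--     # start on the next level of recursion
--     else:
--         s += 1
--
--     # drive all the way down to the base case, and return it all the way up
--     return move_pivot(input, s, p)
-- ===== SOURCE B (Python) =====
-- # Different decomposition: instead of recursively rotating elements, observe that the
-- # returned index is s plus the number of elements of input[s:p] (Python index semantics)
-- # that do not exceed the pivot value.  B does not mutate `input` (the equivalence proved
-- # is about the return value only).
-- def move_pivot(input, s, p):
--     if p == s:
--         return p
--     pivot = input[p]
--     return s + sum(1 for i in range(s, p) if input[i] <= pivot)
-- ===== Notes on version B (the rewrite author's own statement) =====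
-- stated objective: simpler
-- what changed: Replaces the mutating three-element-rotation recursion by a direct one-pass count: the result is s plus the number of elements at Python indices s..p-1 that are <= the pivot value; B does not mutate input (A does), so the equivalence is about the return value only.
import Mathlib
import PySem

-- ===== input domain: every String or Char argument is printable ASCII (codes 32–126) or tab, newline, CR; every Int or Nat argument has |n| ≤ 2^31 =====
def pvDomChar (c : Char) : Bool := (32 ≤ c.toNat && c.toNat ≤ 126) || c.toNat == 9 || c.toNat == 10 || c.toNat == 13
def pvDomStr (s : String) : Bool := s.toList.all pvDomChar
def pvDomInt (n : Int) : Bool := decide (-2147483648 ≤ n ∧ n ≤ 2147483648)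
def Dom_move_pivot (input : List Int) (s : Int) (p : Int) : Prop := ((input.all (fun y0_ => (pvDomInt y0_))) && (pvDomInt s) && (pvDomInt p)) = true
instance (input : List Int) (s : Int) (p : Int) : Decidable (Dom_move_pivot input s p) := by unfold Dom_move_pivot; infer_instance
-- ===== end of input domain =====

-- B replaces A's mutating rotation recursion with a one-pass count (no mutation of
-- `input`; A mutates it in place, so the equivalence proved here is about the RETURN
-- value only).

-- ===== PORT A =====
-- literal transliteration of A; the fuel argument is only a totality guard: each
-- recursive call decreases p - s by exactly 1, so fuel (p - s).toNat never runs out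
-- on inputs where the Python returns (the 0 results mark raising paths, excluded by Pre_).
def movePivotLoop : Nat → List Int → Int → Int → Int
  | fuel, input, s, p =>
    if p = s then p
    else
      match fuel with
      | 0 => 0
      | fuel' + 1 =>
        match PySem.List.pyGet? input s, PySem.List.pyGet? input p with
        | some start, some pivot =>
          if pivot < start then
            match PySem.List.pyGet? input (p - 1) with
            | some w =>
              movePivotLoop fuel'
                (PySem.List.pySetD
                  (PySem.List.pySetD (PySem.List.pySetD input s w) (p - 1) pivot)
                  p start)
                s (p - 1)
            | none => 0
          else
            movePivotLoop fuel' input (s + 1) p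
        | _, _ => 0
def move_pivot (input : List Int) (s : Int) (p : Int) : Int :=
  movePivotLoop (p - s).toNat input s p

-- ===== PORT B =====
def move_pivot_alt (input : List Int) (s : Int) (p : Int) : Int :=
  if p = s then p
  else
    let pivot := PySem.List.pyGetD input p 0   -- input[p]; IndexError outside Pre_
    s + ((PySem.List.pyRange s p 1).map
          (fun i => if PySem.List.pyGetD input i 0 ≤ pivot then (1 : Int) else 0)).sum

-- ===== PRECONDITION & SPEC =====
-- exactly the inputs on which the Python A returns: either the immediate base case
-- p == s, or both indices in Python's wrap range with s ≤ p (otherwise the indices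
-- drift apart until an IndexError).
def Pre_move_pivot (input : List Int) (s : Int) (p : Int) : Prop :=
  p = s ∨ (-(input.length : Int) ≤ s ∧ s ≤ p ∧ p < input.length)
instance (input : List Int) (s : Int) (p : Int) : Decidable (Pre_move_pivot input s p) := by
  unfold Pre_move_pivot; infer_instance

def pvWitness_move_pivot : List Int × Int × Int := ([3, 1, 2], 0, 2)

def Spec_move_pivot (input : List Int) (s : Int) (p : Int) (out : Int) : Prop := out = move_pivot_alt input s p
instance (input : List Int) (s : Int) (p : Int) (out : Int) : Decidable (Spec_move_pivot input s p out) := by unfold Spec_move_pivot; infer_instance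

-- ===== CLAIM (what is proved, stated in full; the proofs are below) =====
def Claim_equal_move_pivot : Prop := ∀ (input : List Int) (s : Int) (p : Int), Dom_move_pivot input s p → Pre_move_pivot input s p → Spec_move_pivot input s p (move_pivot input s p)

-- ===== LEMMAS AND PROOFS =====
def pvCell (n : Nat) (i : Int) : Nat := if 0 ≤ i then i.toNat else n - (-i).toNat

lemma pvIdx_eq (n : Nat) (i : Int) (h1 : -(n : Int) ≤ i) (h2 : i < n) :
    PySem.List.pyIdx? n i = some (pvCell n i) := by
  simp only [PySem.List.pyIdx?, pvCell]
  split_ifs <;> simp only [Option.some.injEq, reduceCtorEq] <;> omega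

lemma pvCell_lt (n : Nat) (i : Int) (h1 : -(n : Int) ≤ i) (h2 : i < n) (hn : 0 < n) :
    pvCell n i < n := by
  unfold pvCell; split <;> omega

lemma pvCell_eq_iff (n : Nat) (i j : Int) (hi1 : -(n : Int) ≤ i) (hi2 : i < n)
    (hj1 : -(n : Int) ≤ j) (hj2 : j < n) :
    pvCell n i = pvCell n j ↔ (i = j ∨ i = j + n ∨ j = i + n) := by
  unfold pvCell; split_ifs <;> omega

lemma pyGet?_cell (l : List Int) (i : Int) (h1 : -(l.length : Int) ≤ i) (h2 : i < l.length) :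
    PySem.List.pyGet? l i = some (l.getD (pvCell l.length i) 0) := by
  have hn : 0 < l.length := by omega
  have hc := pvCell_lt l.length i h1 h2 hn
  simp [PySem.List.pyGet?, pvIdx_eq _ _ h1 h2, List.getElem?_eq_getElem hc,
    List.getD_eq_getElem?_getD]

lemma pyGetD_cell (l : List Int) (i : Int) (h1 : -(l.length : Int) ≤ i) (h2 : i < l.length) :
    PySem.List.pyGetD l i 0 = l.getD (pvCell l.length i) 0 := by
  simp [PySem.List.pyGetD, pyGet?_cell l i h1 h2]

lemma pySetD_cell (l : List Int) (i : Int) (v : Int)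
    (h1 : -(l.length : Int) ≤ i) (h2 : i < l.length) :
    PySem.List.pySetD l i v = l.set (pvCell l.length i) v := by
  simp [PySem.List.pySetD, PySem.List.pySet?, pvIdx_eq _ _ h1 h2]

lemma getD_set_self (l : List Int) (c : Nat) (v : Int) (h : c < l.length) :
    (l.set c v).getD c 0 = v := by
  simp [List.getD_eq_getElem?_getD, List.getElem?_set_self h]

lemma getD_set_ne (l : List Int) (c j : Nat) (v : Int) (h : c ≠ j) :
    (l.set c v).getD j 0 = l.getD j 0 := by
  simp [List.getD_eq_getElem?_getD, List.getElem?_set_ne h]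

lemma triple_read (l : List Int) (a b c j : Nat) (va vb vc : Int)
    (ha : a < l.length) (hb : b < l.length) (hc : c < l.length) (hj : j < l.length)
    (hcb : c ≠ b) (hca : c ≠ a) :
    (((l.set a va).set b vb).set c vc).getD j 0 =
      if j = c then vc else if j = b then vb else if j = a then va else l.getD j 0 := by
  by_cases h1 : j = c
  · subst h1
    rw [if_pos rfl, getD_set_self _ _ _ (by simpa using hc)]
  · rw [if_neg h1, getD_set_ne _ _ _ _ (fun h => h1 h.symm)]
    by_cases h2 : j = b
    · subst h2
      rw [if_pos rfl, getD_set_self _ _ _ (by simpa using hb)]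
    · rw [if_neg h2, getD_set_ne _ _ _ _ (fun h => h2 h.symm)]
      by_cases h3 : j = a
      · subst h3; rw [if_pos rfl, getD_set_self _ _ _ ha]
      · rw [if_neg h3, getD_set_ne _ _ _ _ (fun h => h3 h.symm)]

lemma list_range_sum (m : Nat) (f : Nat → Int) :
    ((List.range m).map f).sum = ∑ k ∈ Finset.range m, f k := by
  induction m with
  | zero => simp
  | succ m ih => simp [List.range_succ, Finset.sum_range_succ, ih]

def pvChi (l : List Int) (piv i : Int) : Int :=
  if l.getD (pvCell l.length i) 0 ≤ piv then 1 else 0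
def pvCnt (l : List Int) (piv s : Int) (m : Nat) : Int :=
  ∑ k ∈ Finset.range m, pvChi l piv (s + k)

lemma rot_cnt (l l3 : List Int) (s p piv start w : Int)
    (hs : -(l.length : Int) ≤ s) (hsp : s < p) (hp : p < l.length)
    (hpiv : piv = l.getD (pvCell l.length p) 0)
    (hstart : start = l.getD (pvCell l.length s) 0)
    (hw : w = l.getD (pvCell l.length (p - 1)) 0)
    (hl3 : l3 = ((l.set (pvCell l.length s) w).set (pvCell l.length (p - 1)) piv).set
        (pvCell l.length p) start)
    (hlt : piv < start) :
    l3.getD (pvCell l3.length (p - 1)) 0 = piv ∧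
      pvCnt l3 piv s (p - 1 - s).toNat = pvCnt l piv s (p - s).toNat := by
  have hn : 0 < l.length := by omega
  set n := l.length with hnn
  have hlen3 : l3.length = n := by
    rw [hl3]; simp only [List.length_set]; exact hnn.symm
  -- cells
  have hbs : -(n:Int) ≤ s ∧ s < n := ⟨hs, by omega⟩
  have hbp : -(n:Int) ≤ p ∧ p < n := ⟨by omega, hp⟩
  have hbp1 : -(n:Int) ≤ p - 1 ∧ p - 1 < n := ⟨by omega, by omega⟩
  have hes := pvCell_lt n s hbs.1 hbs.2 hn
  have hep := pvCell_lt n p hbp.1 hbp.2 hn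
  have hep1 := pvCell_lt n (p - 1) hbp1.1 hbp1.2 hn
  -- pvCell n s ≠ pvCell n p  (otherwise start = piv)
  have hne_sp : pvCell n s ≠ pvCell n p := by
    intro h
    rw [hstart, hpiv, ← h] at hlt
    exact lt_irrefl _ hlt
  -- hence p ≠ s + n, n ≥ 2, and the pivot cell differs from the p-1 cell
  have hdn : p ≠ s + n := by
    intro h
    exact hne_sp ((pvCell_eq_iff n s p hbs.1 hbs.2 hbp.1 hbp.2).2 (by omega))
  have hn2 : 2 ≤ n := by
    by_contra h
    exact hne_sp ((pvCell_eq_iff n s p hbs.1 hbs.2 hbp.1 hbp.2).2 (by omega))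
  have hne_p1p : pvCell n (p - 1) ≠ pvCell n p := by
    intro h
    have := (pvCell_eq_iff n (p - 1) p hbp1.1 hbp1.2 hbp.1 hbp.2).1 h
    omega
  -- reading any cell of l3
  have hread : ∀ j : Nat, j < n →
      l3.getD j 0 = if j = pvCell n p then start else if j = pvCell n (p - 1) then piv
        else if j = pvCell n s then w else l.getD j 0 := by
    intro j hj
    rw [hl3, triple_read l _ _ _ j w piv start hes hep1 hep hj hne_p1p.symm
      (fun h => hne_sp h.symm)]
  have hchi3 : ∀ i : Int, -(n : Int) ≤ i → i < n →
      pvChi l3 piv i = if pvCell n i = pvCell n p then (if start ≤ piv then (1:Int) else 0)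
        else if pvCell n i = pvCell n (p - 1) then (if piv ≤ piv then (1:Int) else 0)
        else if pvCell n i = pvCell n s then (if w ≤ piv then (1:Int) else 0)
        else pvChi l piv i := by
    intro i h1 h2
    unfold pvChi
    rw [hlen3, hread (pvCell n i) (pvCell_lt n i h1 h2 hn)]
    split_ifs <;> rfl
  have hchi : ∀ i : Int, pvChi l piv i = if l.getD (pvCell n i) 0 ≤ piv then 1 else 0 :=
    fun _ => rfl
  -- part 1
  have part1 : l3.getD (pvCell l3.length (p - 1)) 0 = piv := by
    rw [hlen3, hread (pvCell n (p - 1)) hep1, if_neg hne_p1p, if_pos rfl]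
  refine ⟨part1, ?_⟩
  -- part 2: the counting identity
  have hd : ((p - s).toNat : Int) = p - s := Int.toNat_of_nonneg (by omega)
  set d := (p - s).toNat with hdd
  have hd1 : (p - 1 - s).toNat = d - 1 := by omega
  have hdpos : 1 ≤ d := by omega
  -- cell-membership characterizations as linear facts
  have cellS : ∀ i : Int, -(n : Int) ≤ i → i < n →
      (pvCell n i = pvCell n s ↔ (i = s ∨ i = s + n ∨ s = i + n)) :=
    fun i h1 h2 => pvCell_eq_iff n i s h1 h2 hbs.1 hbs.2
  have cellP : ∀ i : Int, -(n : Int) ≤ i → i < n →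
      (pvCell n i = pvCell n p ↔ (i = p ∨ i = p + n ∨ p = i + n)) :=
    fun i h1 h2 => pvCell_eq_iff n i p h1 h2 hbp.1 hbp.2
  have cellP1 : ∀ i : Int, -(n : Int) ≤ i → i < n →
      (pvCell n i = pvCell n (p - 1) ↔ (i = p - 1 ∨ i = p - 1 + n ∨ p - 1 = i + n)) :=
    fun i h1 h2 => pvCell_eq_iff n i (p - 1) h1 h2 hbp1.1 hbp1.2
  -- the three fixed indicator values
  have hXs : pvChi l piv s = 0 := by
    rw [hchi s, ← hstart, if_neg (not_le.2 hlt)]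
  have hXp : pvChi l piv p = 1 := by
    rw [hchi p, ← hpiv, if_pos le_rfl]
  have hXdef : pvChi l piv (p - 1) = if w ≤ piv then 1 else 0 := by
    rw [hchi (p - 1), ← hw]
  -- peel the last summand of the RHS count
  have hsplit : pvCnt l piv s d = pvCnt l piv s (d - 1) + pvChi l piv (p - 1) := by
    have : d = (d - 1) + 1 := by omega
    calc pvCnt l piv s d = ∑ k ∈ Finset.range ((d - 1) + 1), pvChi l piv (s + k) := by
          rw [← this]; rfl
      _ = pvCnt l piv s (d - 1) + pvChi l piv (s + (d - 1 : Nat)) := Finset.sum_range_succ _ _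
      _ = pvCnt l piv s (d - 1) + pvChi l piv (p - 1) := by
          congr 2; push_cast; omega
  rw [hd1, hsplit]
  -- it remains to show the difference sum equals X
  have key : ∑ k ∈ Finset.range (d - 1),
      (pvChi l3 piv (s + k) - pvChi l piv (s + k)) = pvChi l piv (p - 1) := by
    -- the difference vanishes away from the four possible support points
    have hF0 : ∀ k : Nat, (k : Int) < p - 1 - s → k ≠ 0 → (k : Int) ≠ n →
        (k : Int) ≠ p - s - n → (k : Int) ≠ p - 1 - s - n →
        pvChi l3 piv (s + k) - pvChi l piv (s + k) = 0 := by
      intro k hk h0 h1 h2 h3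
      have hb1 : -(n : Int) ≤ s + k := by omega
      have hb2 : (s + k : Int) < n := by omega
      rw [hchi3 (s + k) hb1 hb2,
        if_neg (fun h => by have := (cellP _ hb1 hb2).1 h; omega),
        if_neg (fun h => by have := (cellP1 _ hb1 hb2).1 h; omega),
        if_neg (fun h => by have := (cellS _ hb1 hb2).1 h; omega),
        sub_self]
    by_cases hc1 : p - s = 1
    · -- empty sum; X = pvChi l piv s = 0
      have : d - 1 = 0 := by omega
      rw [this, Finset.sum_range_zero]
      have : p - 1 = s := by omega
      rw [this, hXs]
    · by_cases hc2 : p - s < n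
      · -- no wraparound: only k = 0 contributes
        rw [Finset.sum_eq_single_of_mem 0 (Finset.mem_range.2 (by omega))
          (fun k hk hk0 => hF0 k (by have := Finset.mem_range.1 hk; omega) hk0
            (by have := Finset.mem_range.1 hk; omega) (by omega) (by omega))]
        have hb1 : -(n : Int) ≤ s + (0 : Nat) := by omega
        have hb2 : (s + ((0 : Nat) : Int)) < n := by omega
        rw [hchi3 _ hb1 hb2,
          if_neg (fun h => by have := (cellP _ hb1 hb2).1 h; omega),
          if_neg (fun h => by have := (cellP1 _ hb1 hb2).1 h; omega),
          if_pos ((cellS _ hb1 hb2).2 (by omega))]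
        simp only [Nat.cast_zero, add_zero]
        rw [hXs, hXdef, sub_zero]
      · by_cases hc3 : p - s = n + 1
        · -- exactly one wrap, start cell aliases the p-1 cell: k = 0 and k = 1
          have hsub : ({0, 1} : Finset ℕ) ⊆ Finset.range (d - 1) := by
            intro k hk
            simp only [Finset.mem_insert, Finset.mem_singleton] at hk
            exact Finset.mem_range.2 (by omega)
          rw [← Finset.sum_subset hsub (fun k hk hk' => by
            simp only [Finset.mem_insert, Finset.mem_singleton] at hk'
            exact hF0 k (by have := Finset.mem_range.1 hk; omega)
              (fun h => hk' (Or.inl h)) (by have := Finset.mem_range.1 hk; omega)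
              (by omega) (by omega))]
          rw [Finset.sum_pair (by omega : (0 : ℕ) ≠ 1)]
          -- F 0 = 1
          have hb1 : -(n : Int) ≤ s + ((0 : Nat) : Int) := by omega
          have hb2 : (s + ((0 : Nat) : Int)) < n := by omega
          have hF0v : pvChi l3 piv (s + (0 : Nat)) - pvChi l piv (s + (0 : Nat)) = 1 := by
            rw [hchi3 _ hb1 hb2,
              if_neg (fun h => by have := (cellP _ hb1 hb2).1 h; omega),
              if_pos ((cellP1 _ hb1 hb2).2 (by omega)), if_pos le_rfl]
            simp only [Nat.cast_zero, add_zero]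
            rw [hXs, sub_zero]
          -- F 1 = -1
          have hb3 : -(n : Int) ≤ s + ((1 : Nat) : Int) := by omega
          have hb4 : (s + ((1 : Nat) : Int)) < n := by omega
          have hF1v : pvChi l3 piv (s + (1 : Nat)) - pvChi l piv (s + (1 : Nat)) = -1 := by
            rw [hchi3 _ hb3 hb4, if_pos ((cellP _ hb3 hb4).2 (by omega)),
              if_neg (not_le.2 hlt)]
            have : pvChi l piv (s + (1 : Nat)) = 1 := by
              rw [hchi (s + (1 : Nat)),
                show pvCell n (s + ((1 : Nat) : Int)) = pvCell n p from
                  (cellP _ hb3 hb4).2 (by omega), ← hpiv, if_pos le_rfl]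
            rw [this]; norm_num
          rw [hF0v, hF1v]
          -- the p-1 cell is the s cell here, so the target indicator is 0
          have : pvChi l piv (p - 1) = 0 := by
            rw [hchi (p - 1),
              show pvCell n (p - 1) = pvCell n s from
                (pvCell_eq_iff n (p - 1) s hbp1.1 hbp1.2 hbs.1 hbs.2).2 (by omega),
              ← hstart, if_neg (not_le.2 hlt)]
          rw [this]; norm_num
        · -- double wrap: k ∈ {0, d-1-n, d-n, n}
          have hd2n : p - s ≤ 2 * n - 1 := by omega
          have hgt : (n : Int) + 1 < p - s := by omega
          have hsub : ({0, d - 1 - n, d - n, n} : Finset ℕ) ⊆ Finset.range (d - 1) := by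
            intro k hk
            simp only [Finset.mem_insert, Finset.mem_singleton] at hk
            exact Finset.mem_range.2 (by omega)
          rw [← Finset.sum_subset hsub (fun k hk hk' => by
            simp only [Finset.mem_insert, Finset.mem_singleton] at hk'
            push_neg at hk'
            exact hF0 k (by have := Finset.mem_range.1 hk; omega) hk'.1
              (by omega) (by omega) (by omega))]
          have e1 : (0 : ℕ) ∉ ({d - 1 - n, d - n, n} : Finset ℕ) := by
            simp only [Finset.mem_insert, Finset.mem_singleton]; omega
          have e2 : (d - 1 - n : ℕ) ∉ ({d - n, n} : Finset ℕ) := by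
            simp only [Finset.mem_insert, Finset.mem_singleton]; omega
          have e3 : (d - n : ℕ) ≠ n := by omega
          rw [show ({0, d - 1 - n, d - n, n} : Finset ℕ) =
              insert 0 ({d - 1 - n, d - n, n} : Finset ℕ) from rfl,
            Finset.sum_insert e1,
            show ({d - 1 - n, d - n, n} : Finset ℕ) =
              insert (d - 1 - n) ({d - n, n} : Finset ℕ) from rfl,
            Finset.sum_insert e2, Finset.sum_pair e3]
          -- F 0 = X
          have hb1 : -(n : Int) ≤ s + ((0 : Nat) : Int) := by omega
          have hb2 : (s + ((0 : Nat) : Int)) < n := by omega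
          have hF0v : pvChi l3 piv (s + (0 : Nat)) - pvChi l piv (s + (0 : Nat)) = pvChi l piv (p - 1) := by
            rw [hchi3 _ hb1 hb2,
              if_neg (fun h => by have := (cellP _ hb1 hb2).1 h; omega),
              if_neg (fun h => by have := (cellP1 _ hb1 hb2).1 h; omega),
              if_pos ((cellS _ hb1 hb2).2 (by omega))]
            simp only [Nat.cast_zero, add_zero]
            rw [hXs, hXdef, sub_zero]
          -- F (d-1-n) = 1 - X
          have hcast1 : ((d - 1 - n : ℕ) : Int) = p - 1 - s - n := by omega
          have hb3 : -(n : Int) ≤ s + ((d - 1 - n : ℕ) : Int) := by omega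
          have hb4 : (s + ((d - 1 - n : ℕ) : Int)) < n := by omega
          have hF1v : pvChi l3 piv (s + (d - 1 - n : ℕ)) -
              pvChi l piv (s + (d - 1 - n : ℕ)) = 1 - pvChi l piv (p - 1) := by
            rw [hchi3 _ hb3 hb4,
              if_neg (fun h => by have := (cellP _ hb3 hb4).1 h; omega),
              if_pos ((cellP1 _ hb3 hb4).2 (by omega)), if_pos le_rfl]
            have : pvChi l piv (s + (d - 1 - n : ℕ)) = if w ≤ piv then 1 else 0 := by
              rw [hchi (s + (d - 1 - n : ℕ)),
                show pvCell n (s + ((d - 1 - n : ℕ) : Int)) = pvCell n (p - 1) from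
                  (cellP1 _ hb3 hb4).2 (by omega), ← hw]
            rw [this, hXdef]
          -- F (d-n) = -1
          have hb5 : -(n : Int) ≤ s + ((d - n : ℕ) : Int) := by omega
          have hb6 : (s + ((d - n : ℕ) : Int)) < n := by omega
          have hF2v : pvChi l3 piv (s + (d - n : ℕ)) -
              pvChi l piv (s + (d - n : ℕ)) = -1 := by
            rw [hchi3 _ hb5 hb6, if_pos ((cellP _ hb5 hb6).2 (by omega)),
              if_neg (not_le.2 hlt)]
            have : pvChi l piv (s + (d - n : ℕ)) = 1 := by
              rw [hchi (s + (d - n : ℕ)),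
                show pvCell n (s + ((d - n : ℕ) : Int)) = pvCell n p from
                  (cellP _ hb5 hb6).2 (by omega), ← hpiv, if_pos le_rfl]
            rw [this]; norm_num
          -- F n = X
          have hb7 : -(n : Int) ≤ s + ((n : ℕ) : Int) := by omega
          have hb8 : (s + ((n : ℕ) : Int)) < n := by omega
          have hF3v : pvChi l3 piv (s + (n : ℕ)) - pvChi l piv (s + (n : ℕ)) = pvChi l piv (p - 1) := by
            rw [hchi3 _ hb7 hb8,
              if_neg (fun h => by have := (cellP _ hb7 hb8).1 h; omega),
              if_neg (fun h => by have := (cellP1 _ hb7 hb8).1 h; omega),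
              if_pos ((cellS _ hb7 hb8).2 (by omega))]
            have : pvChi l piv (s + (n : ℕ)) = 0 := by
              rw [hchi (s + (n : ℕ)),
                show pvCell n (s + ((n : ℕ) : Int)) = pvCell n s from
                  (cellS _ hb7 hb8).2 (by omega), ← hstart, if_neg (not_le.2 hlt)]
            rw [this, hXdef, sub_zero]
          rw [hF0v, hF1v, hF2v, hF3v]
          ring
  have hdist : pvCnt l3 piv s (d - 1) - pvCnt l piv s (d - 1) = pvChi l piv (p - 1) := by
    rw [pvCnt, pvCnt, ← Finset.sum_sub_distrib]
    exact key
  omega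

lemma alt_eq (l : List Int) (s p : Int) (hs : -(l.length : Int) ≤ s) (hsp : s ≤ p)
    (hp : p < l.length) :
    move_pivot_alt l s p = s + pvCnt l (l.getD (pvCell l.length p) 0) s (p - s).toNat := by
  by_cases hps : p = s
  · subst hps
    simp [move_pivot_alt, pvCnt]
  · unfold move_pivot_alt
    rw [if_neg hps]
    dsimp only
    rw [PySem.List.pyRange_one, List.map_map, list_range_sum]
    congr 1
    rw [show PySem.List.pyGetD l p 0 = l.getD (pvCell l.length p) 0 from
      pyGetD_cell l p (by omega) hp]
    apply Finset.sum_congr rfl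
    intro k hk
    have hk' := Finset.mem_range.1 hk
    have hb1 : -(l.length : Int) ≤ s + k := by omega
    have hb2 : (s + k : Int) < l.length := by omega
    show (if PySem.List.pyGetD l (s + k) 0 ≤ _ then (1 : Int) else 0) = pvChi l _ (s + k)
    rw [pyGetD_cell l (s + k) hb1 hb2]
    rfl

lemma loop_eq : ∀ (fuel : Nat) (l : List Int) (s p : Int),
    -(l.length : Int) ≤ s → s ≤ p → p < l.length → (p - s).toNat ≤ fuel →
    movePivotLoop fuel l s p = s + pvCnt l (l.getD (pvCell l.length p) 0) s (p - s).toNat := by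
  intro fuel
  induction fuel with
  | zero =>
    intro l s p h1 h2 h3 h4
    have hps : p = s := by omega
    subst hps
    simp [movePivotLoop, pvCnt]
  | succ f ih =>
    intro l s p h1 h2 h3 h4
    by_cases hps : p = s
    · subst hps
      simp [movePivotLoop, pvCnt]
    · have hsp : s < p := lt_of_le_of_ne h2 (fun h => hps h.symm)
      have hn : 0 < l.length := by omega
      rw [show movePivotLoop (f + 1) l s p =
        (match PySem.List.pyGet? l s, PySem.List.pyGet? l p with
        | some start, some pivot =>
          if pivot < start then
            match PySem.List.pyGet? l (p - 1) with
            | some w =>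
              movePivotLoop f
                (PySem.List.pySetD
                  (PySem.List.pySetD (PySem.List.pySetD l s w) (p - 1) pivot)
                  p start)
                s (p - 1)
            | none => 0
          else
            movePivotLoop f l (s + 1) p
        | _, _ => 0) from by rw [movePivotLoop, if_neg hps],
        pyGet?_cell l s h1 (by omega), pyGet?_cell l p (by omega) h3,
        pyGet?_cell l (p - 1) (by omega) (by omega)]
      dsimp only
      by_cases hlt : l.getD (pvCell l.length p) 0 < l.getD (pvCell l.length s) 0
      · rw [if_pos hlt]
        -- rotation step: turn the three pySetD's into plain sets on cells
        have hset1 : PySem.List.pySetD l s (l.getD (pvCell l.length (p - 1)) 0)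
            = l.set (pvCell l.length s) (l.getD (pvCell l.length (p - 1)) 0) :=
          pySetD_cell l s _ h1 (by omega)
        have hl1 : (l.set (pvCell l.length s) (l.getD (pvCell l.length (p - 1)) 0)).length
            = l.length := by simp
        have hset2 : PySem.List.pySetD
              (l.set (pvCell l.length s) (l.getD (pvCell l.length (p - 1)) 0)) (p - 1)
              (l.getD (pvCell l.length p) 0)
            = (l.set (pvCell l.length s) (l.getD (pvCell l.length (p - 1)) 0)).set
              (pvCell l.length (p - 1)) (l.getD (pvCell l.length p) 0) := by
          rw [pySetD_cell _ (p - 1) _ (by rw [hl1]; omega) (by rw [hl1]; omega), hl1]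
        have hl2 : ((l.set (pvCell l.length s) (l.getD (pvCell l.length (p - 1)) 0)).set
            (pvCell l.length (p - 1)) (l.getD (pvCell l.length p) 0)).length
            = l.length := by simp
        have hset3 : PySem.List.pySetD
              ((l.set (pvCell l.length s) (l.getD (pvCell l.length (p - 1)) 0)).set
                (pvCell l.length (p - 1)) (l.getD (pvCell l.length p) 0)) p
              (l.getD (pvCell l.length s) 0)
            = ((l.set (pvCell l.length s) (l.getD (pvCell l.length (p - 1)) 0)).set
                (pvCell l.length (p - 1)) (l.getD (pvCell l.length p) 0)).set
              (pvCell l.length p) (l.getD (pvCell l.length s) 0) := by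
          rw [pySetD_cell _ p _ (by rw [hl2]; omega) (by rw [hl2]; omega), hl2]
        rw [hset1, hset2, hset3]
        have hl3len : (((l.set (pvCell l.length s) (l.getD (pvCell l.length (p - 1)) 0)).set
            (pvCell l.length (p - 1)) (l.getD (pvCell l.length p) 0)).set
            (pvCell l.length p) (l.getD (pvCell l.length s) 0)).length = l.length := by simp
        rw [ih _ s (p - 1) (by rw [hl3len]; omega) (by omega) (by rw [hl3len]; omega)
          (by omega)]
        obtain ⟨hr1, hr2⟩ := rot_cnt l _ s p (l.getD (pvCell l.length p) 0)
          (l.getD (pvCell l.length s) 0) (l.getD (pvCell l.length (p - 1)) 0)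
          h1 hsp h3 rfl rfl rfl rfl hlt
        rw [hr1, hr2]
      · rw [if_neg hlt]
        rw [ih l (s + 1) p (by omega) (by omega) h3 (by omega)]
        have hm : (p - s).toNat = (p - (s + 1)).toNat + 1 := by omega
        rw [hm]
        have hpeel : pvCnt l (l.getD (pvCell l.length p) 0) s ((p - (s + 1)).toNat + 1)
            = (∑ k ∈ Finset.range (p - (s + 1)).toNat,
                pvChi l (l.getD (pvCell l.length p) 0) (s + ((k : Nat) + 1 : Nat)))
              + pvChi l (l.getD (pvCell l.length p) 0) (s + ((0 : Nat) : Int)) :=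
          Finset.sum_range_succ' _ _
        have hchi0 : pvChi l (l.getD (pvCell l.length p) 0) (s + ((0 : Nat) : Int)) = 1 := by
          unfold pvChi
          simp only [Nat.cast_zero, add_zero]
          rw [if_pos (not_lt.1 hlt)]
        have hshift : (∑ k ∈ Finset.range (p - (s + 1)).toNat,
              pvChi l (l.getD (pvCell l.length p) 0) (s + ((k : Nat) + 1 : Nat)))
            = pvCnt l (l.getD (pvCell l.length p) 0) (s + 1) (p - (s + 1)).toNat := by
          apply Finset.sum_congr rfl
          intro k _
          congr 1
          push_cast
          ring
        rw [hpeel, hchi0, hshift]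
        ring

-- ===== VERDICT (by name: the statement is the Claim_ definition above) =====
theorem move_pivot_spec : Claim_equal_move_pivot := by
  intro l s p _ hpre
  unfold Spec_move_pivot
  rcases hpre with hps | ⟨h1, h2, h3⟩
  · subst hps
    simp [move_pivot, movePivotLoop, move_pivot_alt]
  · rw [move_pivot, loop_eq _ l s p h1 h2 h3 le_rfl, alt_eq l s p h1 h2 h3]
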